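-- pv_equiv track=rewrite | github.com/A6y55/Differential-Privacy-Algorithm | rappor_lasso2.py | hash13
-- ===== SOURCE A (Python) =====
-- def hash13(num):
--     temp = [0] * 4
--     num = num * num
--     if num < 26:
--         return num + 5
--     for i in range(4):
--         k = num % 10
--         temp[i] = k
--         num = num // 13
--     return temp[2] * 10 + temp[1]
-- ===== SOURCE B (Python) =====
-- def hash13(num):
--     s = num * num
--     if s < 26:
--         return s + 5
--     return ((s // 169) % 10) * 10 + (s // 13) % 10
-- ===== Notes on version B (the rewrite author's own statement) =====
-- stated objective: simpler
-- what changed: Replaced the four-iteration digit-collecting loop and the temp list with a closed-form expression taking the units digits of the first and second floor-divisions of the square and combining them, dropping the unused first and last loop iterations entirely.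
import Mathlib
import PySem

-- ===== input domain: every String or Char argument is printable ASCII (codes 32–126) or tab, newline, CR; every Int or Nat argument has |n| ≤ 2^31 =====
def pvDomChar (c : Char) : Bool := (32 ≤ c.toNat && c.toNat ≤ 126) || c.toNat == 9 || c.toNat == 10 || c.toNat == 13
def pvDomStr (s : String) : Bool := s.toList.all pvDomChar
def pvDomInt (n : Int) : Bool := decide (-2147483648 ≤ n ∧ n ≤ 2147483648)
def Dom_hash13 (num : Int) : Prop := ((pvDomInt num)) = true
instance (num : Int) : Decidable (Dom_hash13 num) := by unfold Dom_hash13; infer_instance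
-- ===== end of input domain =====

-- B replaces A's 4-iteration digit loop with the closed form ((s//169)%10)*10 + (s//13)%10 (simpler).

-- ===== PORT A =====
def hash13 (num : Int) : Int :=
  let temp : List Int := List.replicate 4 0
  let num := num * num
  if num < 26 then num + 5
  else
    let st := (PySem.List.pyRange 0 4 1).foldl
      (fun (st : List Int × Int) i =>
        let k := PySem.Int.mod st.2 10
        (st.1.set i.toNat k, PySem.Int.floordiv st.2 13)) (temp, num)
    PySem.List.pyGetD st.1 2 0 * 10 + PySem.List.pyGetD st.1 1 0

-- ===== PORT B =====
def hash13_alt (num : Int) : Int :=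
  let s := num * num
  if s < 26 then s + 5
  else
    PySem.Int.mod (PySem.Int.floordiv s 169) 10 * 10 +
      PySem.Int.mod (PySem.Int.floordiv s 13) 10

-- ===== PRECONDITION & SPEC =====
def Spec_hash13 (num : Int) (out : Int) : Prop := out = hash13_alt num
instance (num : Int) (out : Int) : Decidable (Spec_hash13 num out) := by unfold Spec_hash13; infer_instance

-- ===== CLAIM (what is proved, stated in full; the proofs are below) =====
def Claim_equal_hash13 : Prop := ∀ (num : Int), Dom_hash13 num → Spec_hash13 num (hash13 num)

-- ===== LEMMAS AND PROOFS =====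
-- ===== VERDICT (by name: the statement is the Claim_ definition above) =====
theorem hash13_spec : Claim_equal_hash13 := by
  intro num _
  unfold Spec_hash13 hash13 hash13_alt
  by_cases h : num * num < 26
  · simp [h]
  · simp only [h, if_false]
    have hrange : PySem.List.pyRange 0 4 1 = [0, 1, 2, 3] := by decide
    simp only [hrange, List.foldl, List.replicate]
    have h2 : (2:Int).toNat = 2 := rfl
    have h3 : (3:Int).toNat = 3 := rfl
    simp only [h2, h3]
    norm_num [PySem.List.pyGetD, PySem.List.pyIdx?]
    simp only [h2]
    norm_num
    omega
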